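-- pv_equiv track=rewrite | github.com/capraruanthony/ec441-networking-portfolio | week06-ipv4-ipv6-nat-problem/week06_ipv4_ipv6_nat_icmp_problem.py | fragment_datagram
-- ===== SOURCE A (Python) =====
-- def fragment_datagram(total_size: int, header_size: int, mtu: int):
--     payload = total_size - header_size
--     max_payload_per_fragment = ((mtu - header_size) // 8) * 8
--
--     fragments = []
--     offset = 0
--     while offset < payload:
--         frag_payload = min(max_payload_per_fragment, payload - offset)
--         more_fragments = 0 if offset + frag_payload >= payload else 1
--         fragments.append({
--             "total_length": header_size + frag_payload,
--             "mf": more_fragments,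
--             "offset_units": offset // 8,
--             "offset_bytes": offset,
--             "payload_bytes": frag_payload,
--         })
--         offset += frag_payload
--     return fragments
-- ===== SOURCE B (Python) =====
-- def fragment_datagram(total_size: int, header_size: int, mtu: int):
--     payload = total_size - header_size
--     max_payload = ((mtu - header_size) // 8) * 8
--
--     def cuts(p):
--         # offsets of the fragments covering payload bytes [0, p), peeled back-to-front:
--         # the last fragment starts at the largest multiple of max_payload below p
--         if p <= 0:
--             return []
--         off = ((p - 1) // max_payload) * max_payload
--         return cuts(off) + [off]
--
--     offs = cuts(payload)
--     ends = offs[1:] + [payload]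
--     return [
--         {
--             "total_length": header_size + (end - off),
--             "mf": 1 if end < payload else 0,
--             "offset_units": off // 8,
--             "offset_bytes": off,
--             "payload_bytes": end - off,
--         }
--         for off, end in zip(offs, ends)
--     ]
-- ===== Notes on version B (the rewrite author's own statement) =====
-- stated objective: alternative
-- what changed: Replaces A's forward offset-accumulator while-loop by a recursion that peels the LAST fragment's start offset back-to-front to produce the list of cut points, then a second zip pass pairs consecutive cuts to build each record (end - off is the fragment size, no min and no accumulator).
import Mathlib
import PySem

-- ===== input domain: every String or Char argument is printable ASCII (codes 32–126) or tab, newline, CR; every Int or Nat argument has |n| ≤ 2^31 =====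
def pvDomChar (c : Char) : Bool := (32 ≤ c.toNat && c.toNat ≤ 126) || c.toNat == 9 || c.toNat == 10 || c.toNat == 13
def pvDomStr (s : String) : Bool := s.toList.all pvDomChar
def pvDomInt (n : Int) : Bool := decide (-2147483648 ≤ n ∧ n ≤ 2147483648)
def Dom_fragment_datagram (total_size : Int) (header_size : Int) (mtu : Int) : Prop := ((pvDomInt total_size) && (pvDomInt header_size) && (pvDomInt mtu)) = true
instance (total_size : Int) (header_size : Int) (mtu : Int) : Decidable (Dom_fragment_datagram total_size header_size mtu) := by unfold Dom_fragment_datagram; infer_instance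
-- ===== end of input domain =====

-- B replaces A's forward offset-accumulator loop by a back-to-front recursion that peels the
-- last fragment's start offset to list the cut points, then a zip pass pairing consecutive
-- cuts builds the records (alternative decomposition, same cost).

-- ===== PORT A =====
-- A's while-loop; the inner guard `0 < min …` only makes the recursion total: when it fails
-- (max payload per fragment ≤ 0 < payload) the Python loop runs forever, and Pre_ excludes that.
def pvFragA (hs maxp payload offset : Int) : List (List (String × Int)) :=
  if _h1 : offset < payload then
    if _h2 : 0 < min maxp (payload - offset) then
      [("total_length", hs + min maxp (payload - offset)),
       ("mf", if payload ≤ offset + min maxp (payload - offset) then 0 else 1),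
       ("offset_units", PySem.Int.floordiv offset 8),
       ("offset_bytes", offset),
       ("payload_bytes", min maxp (payload - offset))]
        :: pvFragA hs maxp payload (offset + min maxp (payload - offset))
    else []
  else []
termination_by (payload - offset).toNat
decreasing_by omega

def fragment_datagram (total_size : Int) (header_size : Int) (mtu : Int) : List (List (String × Int)) :=
  pvFragA header_size (PySem.Int.floordiv (mtu - header_size) 8 * 8) (total_size - header_size) 0

-- ===== PORT B =====
-- B's `cuts` recursion; the guard `off < p` only makes the recursion total: when it fails
-- (max payload per fragment < 0) the Python recursion grows without bound (RecursionError),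
-- and Pre_ excludes that.
def pvCuts (maxp p : Int) : List Int :=
  if _h1 : p ≤ 0 then []
  else
    if _h2 : PySem.Int.floordiv (p - 1) maxp * maxp < p then
      pvCuts maxp (PySem.Int.floordiv (p - 1) maxp * maxp)
        ++ [PySem.Int.floordiv (p - 1) maxp * maxp]
    else []
termination_by p.toNat
decreasing_by omega

def pvMkFragB (hs payload : Int) (oe : Int × Int) : List (String × Int) :=
  [("total_length", hs + (oe.2 - oe.1)),
   ("mf", if oe.2 < payload then 1 else 0),
   ("offset_units", PySem.Int.floordiv oe.1 8),
   ("offset_bytes", oe.1),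
   ("payload_bytes", oe.2 - oe.1)]

def fragment_datagram_alt (total_size : Int) (header_size : Int) (mtu : Int) : List (List (String × Int)) :=
  let payload := total_size - header_size
  let maxp := PySem.Int.floordiv (mtu - header_size) 8 * 8
  let offs := pvCuts maxp payload
  let ends := offs.drop 1 ++ [payload]
  (offs.zip ends).map (pvMkFragB header_size payload)

-- ===== PRECONDITION & SPEC =====
-- Pre_ excludes inputs with positive payload but max payload per fragment ≤ 0 (mtu - header_size < 8):
-- there Python A loops forever (returns nothing), so nothing can be claimed about its value.
def Pre_fragment_datagram (total_size : Int) (header_size : Int) (mtu : Int) : Prop :=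
  total_size - header_size ≤ 0 ∨ 8 ≤ mtu - header_size
instance (total_size : Int) (header_size : Int) (mtu : Int) : Decidable (Pre_fragment_datagram total_size header_size mtu) := by unfold Pre_fragment_datagram; infer_instance

def pvWitness_fragment_datagram : Int × Int × Int := (100, 20, 60)

def Spec_fragment_datagram (total_size : Int) (header_size : Int) (mtu : Int) (out : List (List (String × Int))) : Prop := out = fragment_datagram_alt total_size header_size mtu
instance (total_size : Int) (header_size : Int) (mtu : Int) (out : List (List (String × Int))) : Decidable (Spec_fragment_datagram total_size header_size mtu out) := by unfold Spec_fragment_datagram; infer_instance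

-- ===== CLAIM (what is proved, stated in full; the proofs are below) =====
def Claim_equal_fragment_datagram : Prop := ∀ (total_size : Int) (header_size : Int) (mtu : Int), Dom_fragment_datagram total_size header_size mtu → Pre_fragment_datagram total_size header_size mtu → Spec_fragment_datagram total_size header_size mtu (fragment_datagram total_size header_size mtu)

-- ===== LEMMAS AND PROOFS =====

-- the common index formula for fragment i (proof helper, used by no port)
def pvMkFrag (hs maxp payload n : Int) (i : Int) : List (String × Int) :=
  [("total_length", hs + min maxp (payload - i * maxp)),
   ("mf", if i < n - 1 then 1 else 0),
   ("offset_units", PySem.Int.floordiv (i * maxp) 8),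
   ("offset_bytes", i * maxp),
   ("payload_bytes", min maxp (payload - i * maxp))]

lemma pvFragA_eq (hs maxp payload n : Int) (hm : 0 < maxp)
    (hub : payload ≤ n * maxp) (hlb : (n - 1) * maxp < payload) :
    ∀ (m k : Nat), (k : Int) + m = n →
      pvFragA hs maxp payload (min ((k : Int) * maxp) payload)
        = (List.range' k m).map (fun (i : Nat) => pvMkFrag hs maxp payload n (i : Int)) := by
  intro m
  induction m with
  | zero =>
    intro k hk
    have hkn : (k : Int) = n := by omega
    have : min ((k : Int) * maxp) payload = payload := by rw [hkn]; omega
    rw [this, pvFragA, dif_neg (lt_irrefl payload)]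
    simp
  | succ m ih =>
    intro k hk
    have hk1 : (k : Int) + 1 ≤ n := by push_cast at hk; omega
    have h1 : (k : Int) * maxp ≤ (n - 1) * maxp :=
      mul_le_mul_of_nonneg_right (by omega) hm.le
    have hoff : (k : Int) * maxp < payload := lt_of_le_of_lt h1 hlb
    have hexp : ((k : Int) + 1) * maxp = (k : Int) * maxp + maxp := by ring
    rw [min_eq_left hoff.le, pvFragA, dif_pos hoff, dif_pos (by omega)]
    rw [List.range'_succ, List.map_cons]
    have hoff' : (k : Int) * maxp + min maxp (payload - (k : Int) * maxp)
        = min (((k + 1 : Nat) : Int) * maxp) payload := by push_cast; omega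
    have hmf : (if payload ≤ (k : Int) * maxp + min maxp (payload - (k : Int) * maxp) then (0 : Int) else 1)
        = (if (k : Int) < n - 1 then 1 else 0) := by
      rcases eq_or_lt_of_le hk1 with heq | hlt
      · have hple : payload ≤ (k : Int) * maxp + maxp := by
          calc payload ≤ n * maxp := hub
            _ = ((k : Int) + 1) * maxp := by rw [heq]
            _ = (k : Int) * maxp + maxp := hexp
        rw [if_pos (by omega), if_neg (by omega)]
      · have h2 : ((k : Int) + 1) * maxp ≤ (n - 1) * maxp :=
          mul_le_mul_of_nonneg_right (by omega) hm.le
        have h3 : (k : Int) * maxp + maxp < payload := by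
          rw [← hexp]; exact lt_of_le_of_lt h2 hlb
        rw [if_neg (by omega), if_pos (by omega)]
    rw [hmf, hoff', ih (k + 1) (by push_cast; push_cast at hk; omega)]
    simp only [pvMkFrag]

-- B's cut recursion produces the offsets 0, maxp, …, (n-1)*maxp
lemma pvCuts_eq (maxp : Int) (hm : 0 < maxp) :
    ∀ (n : Nat) (p : Int), ((n : Int) - 1) * maxp < p → p ≤ (n : Int) * maxp →
      pvCuts maxp p = (List.range n).map (fun (i : Nat) => (i : Int) * maxp) := by
  intro n
  induction n with
  | zero =>
    intro p hlb hub
    have hp0 : p ≤ 0 := by simpa using hub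
    rw [pvCuts, dif_pos hp0]
    simp
  | succ n ih =>
    intro p hlb hub
    push_cast at hlb hub
    have e1 : ((n : Int) + 1 - 1) * maxp = (n : Int) * maxp := by ring
    rw [e1] at hlb
    have e2 : ((n : Int) + 1) * maxp = (n : Int) * maxp + maxp := by ring
    rw [e2] at hub
    have hn0 : (0 : Int) ≤ (n : Int) * maxp := by positivity
    have hp0 : 0 < p := by omega
    have hfd : PySem.Int.floordiv (p - 1) maxp = (n : Int) := by
      rw [PySem.Int.floordiv_eq_iff_of_pos hm, e2]; omega
    rw [pvCuts, dif_neg (by omega), hfd, dif_pos (by omega)]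
    have hrec : pvCuts maxp ((n : Int) * maxp)
        = (List.range n).map (fun (i : Nat) => (i : Int) * maxp) :=
      ih _ (by nlinarith) le_rfl
    rw [hrec, List.range_succ, List.map_append]
    simp

-- pairing consecutive cuts (with payload closing the last) gives the index formula
lemma pvZip_eq (hs maxp payload n : Int) (hm : 0 < maxp)
    (hub : payload ≤ n * maxp) (hlb : (n - 1) * maxp < payload) :
    ∀ (m k : Nat), (k : Int) + ((m : Int) + 1) = n →
      (((List.range' k (m + 1)).map (fun (i : Nat) => (i : Int) * maxp)).zip
        (((List.range' (k + 1) m).map (fun (i : Nat) => (i : Int) * maxp)) ++ [payload])).map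
          (pvMkFragB hs payload)
      = (List.range' k (m + 1)).map (fun (i : Nat) => pvMkFrag hs maxp payload n (i : Int)) := by
  intro m
  induction m with
  | zero =>
    intro k hk
    have hkn : (k : Int) = n - 1 := by omega
    have hmin : min maxp (payload - (k : Int) * maxp) = payload - (k : Int) * maxp := by
      rw [min_eq_right]; nlinarith [hkn]
    simp only [List.range', List.map_cons, List.map_nil, List.nil_append,
      List.zip_cons_cons, List.zip_nil_right, List.map_cons, List.map_nil]
    simp only [pvMkFragB, pvMkFrag]
    rw [hmin, if_neg (lt_irrefl payload), if_neg (show ¬((k : Int) < n - 1) by omega)]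
  | succ m ih =>
    intro k hk
    have hk2 : (k : Int) + 1 ≤ n - 1 := by push_cast at hk ⊢; omega
    have hlt : ((k : Int) + 1) * maxp ≤ (n - 1) * maxp :=
      mul_le_mul_of_nonneg_right hk2 hm.le
    have hltp : ((k : Int) + 1) * maxp < payload := lt_of_le_of_lt hlt hlb
    have hhead : pvMkFragB hs payload ((k : Int) * maxp, ((k + 1 : Nat) : Int) * maxp)
        = pvMkFrag hs maxp payload n (k : Int) := by
      have hc : ((k + 1 : Nat) : Int) = (k : Int) + 1 := by push_cast; ring
      have hmin : min maxp (payload - (k : Int) * maxp) = maxp := by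
        rw [min_eq_left]; nlinarith
      have he : ((k : Int) + 1) * maxp - (k : Int) * maxp = maxp := by ring
      simp only [pvMkFragB, pvMkFrag, hc, hmin]
      rw [he, if_pos hltp, if_pos (by omega)]
    have hih := ih (k + 1) (by push_cast at hk ⊢; omega)
    rw [List.range'_succ (s := k + 1) (n := m)] at hih
    simp only [List.map_cons] at hih
    rw [List.range'_succ (s := k) (n := m + 1), List.range'_succ (s := k + 1) (n := m)]
    simp only [List.map_cons, List.cons_append, List.zip_cons_cons, List.map_cons]
    rw [hih, hhead]

-- ===== VERDICT (by name: the statement is the Claim_ definition above) =====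
theorem fragment_datagram_spec : Claim_equal_fragment_datagram := by
  intro ts hs mtu _ hpre
  unfold Spec_fragment_datagram
  set payload := ts - hs with hp
  set maxp := PySem.Int.floordiv (mtu - hs) 8 * 8 with hmp
  have hA0 : fragment_datagram ts hs mtu = pvFragA hs maxp payload 0 := rfl
  have hB0 : fragment_datagram_alt ts hs mtu
      = ((pvCuts maxp payload).zip ((pvCuts maxp payload).drop 1 ++ [payload])).map
          (pvMkFragB hs payload) := rfl
  rw [hA0, hB0]
  by_cases hple : payload ≤ 0
  · rw [pvFragA, dif_neg (by omega), pvCuts, dif_pos hple]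
    simp
  · have hm : 0 < maxp := by
      have h8 : (8 : Int) ≤ mtu - hs := by
        rcases hpre with h | h
        · omega
        · exact h
      have h1 : (1 : Int) ≤ PySem.Int.floordiv (mtu - hs) 8 := by
        rw [PySem.Int.le_floordiv_iff_mul_le (by norm_num)]; omega
      rw [hmp]; omega
    set n := -(PySem.Int.floordiv (-payload) maxp) with hn
    obtain ⟨hlb, hub⟩ :=
      (PySem.Int.neg_floordiv_neg_eq_iff_of_pos (a := payload) (b := maxp) (q := n) hm).mp rfl
    have hn0 : 0 < n := by nlinarith
    have hA := pvFragA_eq hs maxp payload n hm hub hlb n.toNat 0 (by omega)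
    have h0 : min ((0 : Nat) * maxp : Int) payload = 0 := by push_cast; omega
    rw [h0] at hA
    have hcast : ((n.toNat : Int)) = n := by omega
    have hB : pvCuts maxp payload
        = (List.range n.toNat).map (fun (i : Nat) => (i : Int) * maxp) :=
      pvCuts_eq maxp hm n.toNat payload (by rw [hcast]; exact hlb) (by rw [hcast]; exact hub)
    obtain ⟨m, hmeq⟩ : ∃ m, n.toNat = m + 1 := ⟨n.toNat - 1, by omega⟩
    have hdrop : ((List.range n.toNat).map (fun (i : Nat) => (i : Int) * maxp)).drop 1
        = (List.range' 1 m).map (fun (i : Nat) => (i : Int) * maxp) := by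
      rw [hmeq, List.range_eq_range', List.range'_succ, List.map_cons, List.drop_one,
        List.tail_cons]
    have hZ := pvZip_eq hs maxp payload n hm hub hlb m 0
      (by push_cast; rw [← hcast, hmeq]; push_cast; ring)
    rw [show (0 : Nat) + 1 = 1 from rfl] at hZ
    rw [hA, hB, hdrop, hmeq, List.range_eq_range', hZ]
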